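-- pv_equiv track=rewrite | github.com/pypi-data/pypi-mirror-392 | packages/stindex/stindex-1.0.2-py3-none-any.whl/stindex/exe/evaluate.py | get_category_for_chunk
-- ===== SOURCE A (Python) =====
-- def get_category_for_chunk(chunk_id: str) -> str:
--     """
--     Determine test case category based on chunk_id/document_id.
--
--     Categories:
--     - simple: Documents 6-8 (chunk_ids with mining_accident, school_opening, product_launch)
--     - normal: Documents 9-11 (festival, transport, climate_research)
--     - ambiguous: Documents 12-16 (hospital, university_conference, beach_closure, shopping_center, community_meeting)
--     - relative: Documents 17-20 (political_rally, art_exhibition, construction_timeline, emergency_response)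
--     """
--     chunk_id_lower = chunk_id.lower()
--
--     # Simple cases
--     if any(x in chunk_id_lower for x in ["mining_accident", "school_opening", "product_launch"]):
--         return "simple"
--
--     # Normal cases
--     elif any(x in chunk_id_lower for x in ["festival", "transport", "climate_research"]):
--         return "normal"
--
--     # Ambiguous cases
--     elif any(x in chunk_id_lower for x in ["hospital_emergency", "university_conference", "beach_closure",
--                                              "shopping_center", "community_meeting"]):
--         return "ambiguous"
--
--     # Relative cases
--     elif any(x in chunk_id_lower for x in ["political_rally", "art_exhibition", "construction_timeline",
--                                              "emergency_response"]):
--         return "relative"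
--
--     # First 5 documents (existing in dataset)
--     elif any(x in chunk_id_lower for x in ["cyclone_wa", "uwa_research", "health_outbreak",
--                                              "afl_finals", "bushfire_nsw"]):
--         return "mixed"
--
--     return "unknown"
-- ===== SOURCE B (Python) =====
-- # B: instead of an if/elif chain that stops at the first matching category,
-- # flatten all patterns into one pattern->priority map, compute the MINIMUM
-- # priority over every matching pattern with a single accumulator loop, and
-- # index the category-name table by that priority (5 = no match -> "unknown").
-- # Correct because the branches are tried in priority order, so the first
-- # matching branch is exactly the minimum matching priority.
-- _PATTERN_RANK = {
--     "mining_accident": 0, "school_opening": 0, "product_launch": 0,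
--     "festival": 1, "transport": 1, "climate_research": 1,
--     "hospital_emergency": 2, "university_conference": 2, "beach_closure": 2,
--     "shopping_center": 2, "community_meeting": 2,
--     "political_rally": 3, "art_exhibition": 3, "construction_timeline": 3,
--     "emergency_response": 3,
--     "cyclone_wa": 4, "uwa_research": 4, "health_outbreak": 4,
--     "afl_finals": 4, "bushfire_nsw": 4,
-- }
-- _NAMES = ["simple", "normal", "ambiguous", "relative", "mixed", "unknown"]
--
--
-- def get_category_for_chunk(chunk_id: str) -> str:
--     cid = chunk_id.lower()
--     rank = 5
--     for pattern, r in _PATTERN_RANK.items():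
--         if r < rank and pattern in cid:
--             rank = r
--     return _NAMES[rank]
-- ===== Notes on version B (the rewrite author's own statement) =====
-- stated objective: alternative
-- what changed: Replaces the first-match if/elif chain over category groups by an exhaustive minimum-priority fold over a flat pattern-to-rank map, then indexes a name table by the resulting rank.
import Mathlib
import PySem

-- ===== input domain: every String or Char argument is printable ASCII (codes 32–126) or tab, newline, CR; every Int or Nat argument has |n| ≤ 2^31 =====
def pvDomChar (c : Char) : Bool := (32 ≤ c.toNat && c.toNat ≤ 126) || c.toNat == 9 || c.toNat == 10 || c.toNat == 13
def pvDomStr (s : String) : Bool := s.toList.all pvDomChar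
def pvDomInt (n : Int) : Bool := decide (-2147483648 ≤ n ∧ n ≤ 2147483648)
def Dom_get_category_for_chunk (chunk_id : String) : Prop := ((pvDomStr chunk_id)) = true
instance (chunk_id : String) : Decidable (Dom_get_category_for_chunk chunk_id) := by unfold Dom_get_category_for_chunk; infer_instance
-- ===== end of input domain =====

-- B replaces A's first-match if/elif chain by an exhaustive minimum-priority fold over a
-- flat pattern→rank map, then indexes a name table by the rank (objective: alternative).

-- ===== PORT A =====
def get_category_for_chunk (chunk_id : String) : String :=
  let chunk_id_lower := PySem.Str.lower chunk_id
  if ["mining_accident", "school_opening", "product_launch"].any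
      (fun x => PySem.Str.isIn x chunk_id_lower) then
    "simple"
  else if ["festival", "transport", "climate_research"].any
      (fun x => PySem.Str.isIn x chunk_id_lower) then
    "normal"
  else if ["hospital_emergency", "university_conference", "beach_closure",
           "shopping_center", "community_meeting"].any
      (fun x => PySem.Str.isIn x chunk_id_lower) then
    "ambiguous"
  else if ["political_rally", "art_exhibition", "construction_timeline",
           "emergency_response"].any
      (fun x => PySem.Str.isIn x chunk_id_lower) then
    "relative"
  else if ["cyclone_wa", "uwa_research", "health_outbreak",
           "afl_finals", "bushfire_nsw"].any
      (fun x => PySem.Str.isIn x chunk_id_lower) then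
    "mixed"
  else
    "unknown"

-- ===== PORT B =====
-- the _PATTERN_RANK dict, in insertion order
def pvPatternRank : List (String × Nat) :=
  [("mining_accident", 0), ("school_opening", 0), ("product_launch", 0),
   ("festival", 1), ("transport", 1), ("climate_research", 1),
   ("hospital_emergency", 2), ("university_conference", 2), ("beach_closure", 2),
   ("shopping_center", 2), ("community_meeting", 2),
   ("political_rally", 3), ("art_exhibition", 3), ("construction_timeline", 3),
   ("emergency_response", 3),
   ("cyclone_wa", 4), ("uwa_research", 4), ("health_outbreak", 4),
   ("afl_finals", 4), ("bushfire_nsw", 4)]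

def pvNames : List String :=
  ["simple", "normal", "ambiguous", "relative", "mixed", "unknown"]

-- loop body: 'if r < rank and pattern in cid: rank = r'
def pvStep (cid : String) (rank : Nat) (pr : String × Nat) : Nat :=
  if decide (pr.2 < rank) && PySem.Str.isIn pr.1 cid then pr.2 else rank

def get_category_for_chunk_alt (chunk_id : String) : String :=
  let cid := PySem.Str.lower chunk_id
  let rank := pvPatternRank.foldl (pvStep cid) 5
  -- _NAMES[rank]: rank ≤ 5 always, so plain in-range list indexing
  pvNames.getD rank "unknown"

-- ===== PRECONDITION & SPEC =====
def Spec_get_category_for_chunk (chunk_id : String) (out : String) : Prop := out = get_category_for_chunk_alt chunk_id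
instance (chunk_id : String) (out : String) : Decidable (Spec_get_category_for_chunk chunk_id out) := by unfold Spec_get_category_for_chunk; infer_instance

-- ===== CLAIM (what is proved, stated in full; the proofs are below) =====
def Claim_equal_get_category_for_chunk : Prop := ∀ (chunk_id : String), Dom_get_category_for_chunk chunk_id → Spec_get_category_for_chunk chunk_id (get_category_for_chunk chunk_id)

-- ===== LEMMAS AND PROOFS =====

-- folding B's step over one rank-r group updates the accumulator exactly when the
-- group has a match and r improves on it
theorem pv_fold_group (cid : String) (g : List String) (r acc : Nat)
    (rest : List (String × Nat)) :
    List.foldl (pvStep cid) acc (g.map (fun p => (p, r)) ++ rest)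
      = List.foldl (pvStep cid)
          (if decide (r < acc) && g.any (fun p => PySem.Str.isIn p cid) then r else acc)
          rest := by
  induction g generalizing acc with
  | nil => simp
  | cons p g ih =>
    simp only [List.map_cons, List.cons_append, List.foldl_cons, List.any_cons]
    by_cases hp : PySem.Chars.isIn p.toList cid.toList = true <;>
    by_cases hr : r < acc <;>
    simp [pvStep, PySem.Str.isIn, hp, hr, ih]

-- ===== VERDICT (by name: the statement is the Claim_ definition above) =====
theorem get_category_for_chunk_spec : Claim_equal_get_category_for_chunk := by
  intro chunk_id _
  have htab : pvPatternRank =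
      (["mining_accident", "school_opening", "product_launch"].map (fun p => (p, 0)) ++
       (["festival", "transport", "climate_research"].map (fun p => (p, 1)) ++
        (["hospital_emergency", "university_conference", "beach_closure",
          "shopping_center", "community_meeting"].map (fun p => (p, 2)) ++
         (["political_rally", "art_exhibition", "construction_timeline",
           "emergency_response"].map (fun p => (p, 3)) ++
          (["cyclone_wa", "uwa_research", "health_outbreak",
            "afl_finals", "bushfire_nsw"].map (fun p => (p, 4)) ++ ([] : List (String × Nat))))))) := by
    rfl
  simp only [Spec_get_category_for_chunk, get_category_for_chunk, get_category_for_chunk_alt,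
    htab, pv_fold_group]
  generalize (["mining_accident", "school_opening", "product_launch"].any
      fun p => PySem.Str.isIn p (PySem.Str.lower chunk_id)) = b1
  generalize (["festival", "transport", "climate_research"].any
      fun p => PySem.Str.isIn p (PySem.Str.lower chunk_id)) = b2
  generalize (["hospital_emergency", "university_conference", "beach_closure",
      "shopping_center", "community_meeting"].any
      fun p => PySem.Str.isIn p (PySem.Str.lower chunk_id)) = b3
  generalize (["political_rally", "art_exhibition", "construction_timeline",
      "emergency_response"].any fun p => PySem.Str.isIn p (PySem.Str.lower chunk_id)) = b4
  generalize (["cyclone_wa", "uwa_research", "health_outbreak",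
      "afl_finals", "bushfire_nsw"].any fun p => PySem.Str.isIn p (PySem.Str.lower chunk_id)) = b5
  cases b1 <;> cases b2 <;> cases b3 <;> cases b4 <;> cases b5 <;> rfl
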